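-- pv_equiv track=rewrite | github.com/dh0728/baek_prog_algo | 백준/Bronze/1159. 농구 경기/농구 경기.py | find_starters
-- ===== SOURCE A (Python) =====
-- from collections import Counter
--
-- def find_starters(players):
--     first_letters = [player[0] for player in players]  # 각 선수 성의 첫 글자를 추출
--     letter_count = Counter(first_letters)  # 첫 글자의 빈도 계산
--
--     # 5명 이상인 첫 글자만 필터링
--     starters = [letter for letter, count in letter_count.items() if count >= 5]
--
--     if starters:
--         # 사전순 정렬 후 출력
--         return ''.join(sorted(starters))
--     else:
--         # 선발할 수 없으면 "PREDAJA" 출력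
--         return "PREDAJA"
-- ===== SOURCE B (Python) =====
-- def find_starters(players):
--     letters = sorted(player[0] for player in players)
--     result = []
--     cur = None
--     run = 0
--     for ch in letters:
--         if ch == cur:
--             run += 1
--         else:
--             if run >= 5:
--                 result.append(cur)
--             cur = ch
--             run = 1
--     if run >= 5:
--         result.append(cur)
--     return ''.join(result) if result else "PREDAJA"
-- ===== Notes on version B (the rewrite author's own statement) =====
-- stated objective: alternative
-- what changed: Replaces the Counter(dict)-then-filter-then-sort pipeline by sorting the first letters once and doing a single run-length scan over the sorted list, emitting each letter whose run reaches 5; the output is built already in sorted order.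
-- outside the precondition, e.g. on find_starters(['', 'abc']): A raises IndexError, B raises IndexError
import Mathlib
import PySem

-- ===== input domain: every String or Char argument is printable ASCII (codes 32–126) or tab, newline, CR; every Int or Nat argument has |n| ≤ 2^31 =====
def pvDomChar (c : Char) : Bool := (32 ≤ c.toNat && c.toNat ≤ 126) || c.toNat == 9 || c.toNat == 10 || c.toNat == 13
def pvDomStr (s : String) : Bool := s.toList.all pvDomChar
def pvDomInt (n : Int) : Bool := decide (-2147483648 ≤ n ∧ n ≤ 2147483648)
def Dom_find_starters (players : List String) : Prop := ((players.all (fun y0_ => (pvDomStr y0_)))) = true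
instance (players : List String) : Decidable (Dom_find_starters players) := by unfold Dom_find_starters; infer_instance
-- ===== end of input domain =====

-- B replaces A's Counter → filter → sort pipeline by sorting the first letters once and emitting each letter whose run reaches 5 in a single scan (alternative decomposition, similar cost).

-- ===== PORT A =====
def find_starters (players : List String) : String :=
  -- 'player[0]' raises IndexError on an empty string; Pre_ excludes those inputs, so '.getD ' '' is never reached
  let first_letters : List Char := players.map (fun player => (PySem.Str.pyGet? player 0).getD ' ')
  let letter_count : PySem.Dict Char Int := PySem.Dict.counter first_letters
  let starters : List Char := (letter_count.items.filter (fun lc => 5 ≤ lc.2)).map (fun lc => lc.1)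
  if starters ≠ [] then String.mk (PySem.List.sorted starters (fun c => c)) else "PREDAJA"

-- ===== PORT B =====
-- loop body of B's run-length scan: state = (result, current letter, run length)
def pvStep (st : List Char × Option Char × Nat) (ch : Char) : List Char × Option Char × Nat :=
  if some ch = st.2.1 then (st.1, st.2.1, st.2.2 + 1)
  else ((if 5 ≤ st.2.2 then st.1 ++ [st.2.1.getD ' '] else st.1), some ch, 1)

def find_starters_alt (players : List String) : String :=
  let letters : List Char := PySem.List.sorted (players.map (fun player => (PySem.Str.pyGet? player 0).getD ' ')) (fun c => c)
  let st := letters.foldl pvStep ([], none, 0)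
  let result : List Char := if 5 ≤ st.2.2 then st.1 ++ [st.2.1.getD ' '] else st.1
  if result ≠ [] then String.mk result else "PREDAJA"

-- ===== PRECONDITION & SPEC =====
-- Pre_ excludes players lists containing an empty string, on which Python's player[0] raises IndexError (in A and in B alike).
def Pre_find_starters (players : List String) : Prop := ∀ p ∈ players, p ≠ ""
instance (players : List String) : Decidable (Pre_find_starters players) := by unfold Pre_find_starters; infer_instance
def pvWitness_find_starters : List String := ["ba", "bo", "bu", "be", "bi", "x"]
def Spec_find_starters (players : List String) (out : String) : Prop := out = find_starters_alt players
instance (players : List String) (out : String) : Decidable (Spec_find_starters players out) := by unfold Spec_find_starters; infer_instance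

-- ===== CLAIM (what is proved, stated in full; the proofs are below) =====
def Claim_equal_find_starters : Prop := ∀ (players : List String), Dom_find_starters players → Pre_find_starters players → Spec_find_starters players (find_starters players)

-- ===== LEMMAS AND PROOFS =====

-- B's flush after the loop, as a function of the final state
def pvFlush (st : List Char × Option Char × Nat) : List Char :=
  if 5 ≤ st.2.2 then st.1 ++ [st.2.1.getD ' '] else st.1

-- recursive mirror of B's scan: current letter c, run length so far r
def pvG : Char → Nat → List Char → List Char
  | c, r, [] => if 5 ≤ r then [c] else []
  | c, r, x :: xs => if x = c then pvG c (r + 1) xs else (if 5 ≤ r then [c] else []) ++ pvG x 1 xs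

-- consecutive dedup (first of each run), proof-side spec only; on sorted lists = the distinct letters in order
def pvOdup : List Char → List Char
  | [] => []
  | [x] => [x]
  | x :: y :: xs => if x = y then pvOdup (y :: xs) else x :: pvOdup (y :: xs)

-- the common value of both programs (before joining): distinct letters of S in order, with count ≥ 5
def pvD (S : List Char) : List Char := (pvOdup S).filter (fun d => 5 ≤ S.count d)

lemma pvMem_odup (S : List Char) (d : Char) : d ∈ pvOdup S ↔ d ∈ S := by
  induction S using pvOdup.induct with
  | case1 => simp [pvOdup]
  | case2 x => simp [pvOdup]
  | case3 y xs ih => rw [pvOdup, if_pos rfl, ih]; simp [List.mem_cons]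
  | case4 x y xs h ih => rw [pvOdup, if_neg h]; simp [ih]

lemma pvPairwise_odup (S : List Char) : S.Pairwise (· ≤ ·) → (pvOdup S).Pairwise (· < ·) := by
  induction S using pvOdup.induct with
  | case1 => intro _; simp [pvOdup]
  | case2 x => intro _; simp [pvOdup]
  | case3 y xs ih => intro h; rw [pvOdup, if_pos rfl]; exact ih h.of_cons
  | case4 x y xs he ih =>
    intro h
    rw [pvOdup, if_neg he, List.pairwise_cons]
    refine ⟨fun d hd => ?_, ih h.of_cons⟩
    have hdm : d ∈ y :: xs := (pvMem_odup _ _).mp hd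
    have hxy : x < y := lt_of_le_of_ne (List.rel_of_pairwise_cons h List.mem_cons_self) he
    rcases List.mem_cons.mp hdm with e | hm
    · exact e ▸ hxy
    · exact lt_of_lt_of_le hxy (List.rel_of_pairwise_cons h.of_cons hm)

lemma pvNodup_odup (S : List Char) (h : S.Pairwise (· ≤ ·)) : (pvOdup S).Nodup :=
  (pvPairwise_odup S h).imp ne_of_lt

lemma pvOdup_replicate_append (c : Char) (T : List Char) (hc : ∀ t ∈ T, c < t) :
    ∀ (r : Nat), 1 ≤ r → pvOdup (List.replicate r c ++ T) = c :: pvOdup T := by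
  intro r
  induction r with
  | zero => omega
  | succ r ih =>
    intro _
    by_cases hr : 1 ≤ r
    · rw [List.replicate_succ, List.cons_append]
      have e : List.replicate r c ++ T = c :: (List.replicate (r - 1) c ++ T) := by
        obtain ⟨r', rfl⟩ : ∃ r', r = r' + 1 := ⟨r - 1, by omega⟩
        simp [List.replicate_succ]
      rw [e, pvOdup, if_pos rfl, ← e, ih hr]
    · have hr0 : r = 0 := by omega
      subst hr0
      simp only [List.replicate_succ, List.replicate_zero, List.nil_append, List.cons_append,
        List.nil_append]
      cases T with
      | nil => rfl
      | cons t T' =>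
        have hne : c ≠ t := ne_of_lt (hc t List.mem_cons_self)
        rw [pvOdup, if_neg hne]

lemma pvCount_replicate_append_self (r : Nat) (c : Char) (T : List Char) (hc : c ∉ T) :
    (List.replicate r c ++ T).count c = r := by
  rw [List.count_append, List.count_replicate_self, List.count_eq_zero.mpr hc]
  omega

lemma pvCount_replicate_append_ne (r : Nat) (c d : Char) (hd : d ≠ c) (T : List Char) :
    (List.replicate r c ++ T).count d = T.count d := by
  rw [List.count_append, List.count_replicate]
  simp [Ne.symm hd]

lemma pvFlush_foldl (S : List Char) : ∀ (res : List Char) (c : Char) (r : Nat),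
    pvFlush (S.foldl pvStep (res, some c, r)) = res ++ pvG c r S := by
  induction S with
  | nil =>
    intro res c r
    simp only [List.foldl_nil, pvFlush, pvG]
    split_ifs <;> simp
  | cons x xs ih =>
    intro res c r
    by_cases h : x = c
    · subst h
      have hstep : pvStep (res, some x, r) x = (res, some x, r + 1) := by simp [pvStep]
      rw [List.foldl_cons, hstep, ih]
      simp [pvG]
    · have hx : ¬ (some x = some c) := by simp [h]
      have hstep : pvStep (res, some c, r) x
          = ((if 5 ≤ r then res ++ [c] else res), some x, 1) := by
        simp [pvStep, hx]
      rw [List.foldl_cons, hstep, ih, pvG, if_neg h]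
      split_ifs <;> simp

lemma pvG_eq_pvD (S : List Char) : ∀ (c : Char) (r : Nat), 1 ≤ r →
    S.Pairwise (· ≤ ·) → (∀ x ∈ S, c ≤ x) → pvG c r S = pvD (List.replicate r c ++ S) := by
  induction S with
  | nil =>
    intro c r hr _ _
    have h1 := pvOdup_replicate_append c [] (by simp) r hr
    simp only [List.append_nil] at h1 ⊢
    rw [pvG, pvD, h1, pvOdup]
    rw [List.filter_cons]
    simp [List.count_replicate_self]
  | cons x xs ih =>
    intro c r hr hp hle
    have hx : ∀ y ∈ xs, x ≤ y := fun y hy => List.rel_of_pairwise_cons hp hy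
    by_cases h : x = c
    · subst h
      rw [pvG, if_pos rfl]
      have e : List.replicate r x ++ x :: xs = List.replicate (r + 1) x ++ xs := by
        simp [List.replicate_succ', List.append_assoc]
      rw [ih x (r + 1) (by omega) hp.of_cons hx, e]
    · have hcx : c < x := lt_of_le_of_ne (hle x List.mem_cons_self) fun e => h e.symm
      have hlt : ∀ t ∈ x :: xs, c < t := by
        intro t ht
        rcases List.mem_cons.mp ht with e | hm
        · exact e ▸ hcx
        · exact lt_of_lt_of_le hcx (hx t hm)
      have hcnot : c ∉ x :: xs := fun hmem => absurd (hlt c hmem) (lt_irrefl c)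
      rw [pvG, if_neg h]
      have ih1 := ih x 1 le_rfl hp.of_cons hx
      simp only [List.replicate_succ, List.replicate_zero, List.nil_append, List.cons_append] at ih1
      rw [ih1]
      simp only [pvD]
      rw [pvOdup_replicate_append c _ hlt r hr, List.filter_cons]
      rw [pvCount_replicate_append_self r c _ hcnot]
      have hfc : ((pvOdup (x :: xs)).filter
          (fun d => decide (5 ≤ (List.replicate r c ++ x :: xs).count d)))
          = (pvOdup (x :: xs)).filter (fun d => decide (5 ≤ (x :: xs).count d)) := by
        apply List.filter_congr
        intro d hd
        have hdm : d ∈ x :: xs := (pvMem_odup _ _).mp hd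
        have hdne : d ≠ c := by
          intro e; subst e; exact hcnot hdm
        rw [pvCount_replicate_append_ne r c d hdne]
      rw [hfc]
      by_cases h5 : 5 ≤ r
      · simp [h5]
      · simp [h5]

lemma pvAlt_result (S : List Char) (hS : S.Pairwise (· ≤ ·)) :
    pvFlush (S.foldl pvStep ([], none, 0)) = pvD S := by
  cases S with
  | nil =>
    simp [pvFlush, pvD, pvOdup]
  | cons x xs =>
    have h1 : pvStep ([], none, 0) x = ([], some x, 1) := by
      simp [pvStep]
    rw [List.foldl_cons, h1, pvFlush_foldl]
    have h2 := pvG_eq_pvD xs x 1 le_rfl hS.of_cons (fun y hy => List.rel_of_pairwise_cons hS hy)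
    simp only [List.replicate_succ, List.replicate_zero, List.nil_append, List.cons_append] at h2
    rw [h2, List.nil_append]

lemma pvFilter_map_pair (l : List Char) (f : Char → Int) :
    ((l.map (fun k => (k, f k))).filter (fun lc => 5 ≤ lc.2)).map (fun lc => lc.1)
      = l.filter (fun k => 5 ≤ f k) := by
  induction l with
  | nil => rfl
  | cons a l ih =>
    by_cases h : (5 : Int) ≤ f a <;> simp [h, ih]

lemma pvSorted_starters (L : List Char) :
    PySem.List.sorted ((PySem.Set.ofList L).filter (fun k => decide (5 ≤ ((L.count k : Int))))) (fun c => c)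
      = pvD (PySem.List.sorted L (fun c => c)) := by
  apply PySem.List.sorted_eq_of_perm_of_pairwise_lt
  · have hperm : (PySem.List.sorted L (fun c => c)).Perm L := PySem.List.sorted_perm L _ false
    simp only [pvD]
    rw [List.perm_ext_iff_of_nodup ((pvNodup_odup _ (PySem.List.sorted_pairwise L (fun c => c))).filter _) ((PySem.Set.nodup_ofList L).filter _)]
    intro a
    simp only [List.mem_filter, pvMem_odup, PySem.Set.mem_ofList, decide_eq_true_eq]
    rw [hperm.mem_iff, hperm.count_eq]
    constructor
    · rintro ⟨hm, hc⟩; exact ⟨hm, by exact_mod_cast hc⟩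
    · rintro ⟨hm, hc⟩; exact ⟨hm, by exact_mod_cast hc⟩
  · exact (pvPairwise_odup _ (PySem.List.sorted_pairwise L (fun c => c))).filter _

-- ===== VERDICT (by name: the statement is the Claim_ definition above) =====
theorem find_starters_spec : Claim_equal_find_starters := by
  intro players _ _
  unfold Spec_find_starters find_starters find_starters_alt
  simp only []
  set L : List Char := players.map (fun player => (PySem.Str.pyGet? player 0).getD ' ') with hL
  set S : List Char := PySem.List.sorted L (fun c => c) with hS
  have hres : pvFlush (S.foldl pvStep ([], none, 0)) = pvD S :=
    pvAlt_result S (PySem.List.sorted_pairwise L (fun c => c))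
  have hA : PySem.List.sorted
      (((PySem.Dict.counter L).items.filter (fun lc => 5 ≤ lc.2)).map (fun lc => lc.1)) (fun c => c)
      = pvD S := by
    rw [PySem.Dict.items_counter, pvFilter_map_pair]
    exact pvSorted_starters L
  have hstart : (((PySem.Dict.counter L).items.filter (fun lc => 5 ≤ lc.2)).map (fun lc => lc.1)) = []
      ↔ pvD S = [] := by
    constructor
    · intro h; rw [← hA, h]; rfl
    · intro h
      have hperm := PySem.List.sorted_perm
        (((PySem.Dict.counter L).items.filter (fun lc => 5 ≤ lc.2)).map (fun lc => lc.1)) (fun c : Char => c) false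
      rw [hA, h] at hperm
      exact hperm.symm.eq_nil
  rw [pvFlush] at hres
  rw [hres, hA]
  by_cases hempty : pvD S = []
  · rw [if_neg (by simp [hstart.mpr hempty]), if_neg (by simp [hempty])]
  · rw [if_pos (by simp [hempty, hstart]), if_pos (by simp [hempty])]
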